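-- pv_equiv track=rewrite | github.com/hcholab/sfgwas-lmm | scripts/matrix_text2bin_blocks.py | get_block_inds
-- ===== SOURCE A (Python) =====
-- def get_block_inds(ntot, nblock):
--     blockinds = [0] * (nblock + 1)
--     perblock = int(ntot / nblock)
--     nrem = ntot - perblock * nblock
--     for i in range(nblock):
--         count = perblock
--         if i < nrem:
--             count += 1
--         blockinds[i + 1] = blockinds[i] + count
--     return blockinds
-- ===== SOURCE B (Python) =====
-- def get_block_inds(ntot, nblock):
--     perblock = int(ntot / nblock)
--     nrem = ntot - perblock * nblock
--     return [perblock * i + max(0, min(i, nrem)) for i in range(nblock + 1)]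
-- ===== Notes on version B (the rewrite author's own statement) =====
-- stated objective: simpler
-- what changed: Replaces the preallocated list and running prefix-sum loop by a single closed-form comprehension perblock*i + max(0, min(i, nrem)) per boundary.
import Mathlib
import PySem

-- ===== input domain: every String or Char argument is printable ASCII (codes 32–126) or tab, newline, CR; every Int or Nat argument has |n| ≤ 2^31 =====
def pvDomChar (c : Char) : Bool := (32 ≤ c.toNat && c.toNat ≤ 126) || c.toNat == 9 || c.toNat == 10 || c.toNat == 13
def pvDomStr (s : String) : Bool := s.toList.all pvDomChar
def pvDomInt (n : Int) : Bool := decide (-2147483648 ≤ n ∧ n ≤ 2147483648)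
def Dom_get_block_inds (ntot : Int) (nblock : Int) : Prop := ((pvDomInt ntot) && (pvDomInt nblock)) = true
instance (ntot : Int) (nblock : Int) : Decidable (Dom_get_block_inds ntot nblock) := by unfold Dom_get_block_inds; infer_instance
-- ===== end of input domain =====

-- B replaces A's running prefix-sum loop over a preallocated list by a closed-form
-- value perblock*i + max(0, min(i, nrem)) for each boundary independently (objective: simpler).

-- ===== PORT A =====
-- int(ntot/nblock): Python float division then truncation; on Dom (|args| ≤ 2^31) the
-- float quotient is correctly rounded and never crosses an integer, so it equals
-- truncating integer division Int.tdiv exactly.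
def get_block_inds (ntot : Int) (nblock : Int) : List Int :=
  let blockinds : List Int := List.replicate (nblock + 1).toNat 0
  let perblock : Int := Int.tdiv ntot nblock
  let nrem : Int := ntot - perblock * nblock
  (PySem.List.pyRange 0 nblock 1).foldl (fun b i =>
    let count : Int := perblock + (if i < nrem then 1 else 0)
    -- blockinds[i + 1] = blockinds[i] + count  (both indexes are always in range here)
    PySem.List.pySetD b (i + 1) (PySem.List.pyGetD b i 0 + count)) blockinds

-- ===== PORT B =====
def get_block_inds_alt (ntot : Int) (nblock : Int) : List Int :=
  let perblock : Int := Int.tdiv ntot nblock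
  let nrem : Int := ntot - perblock * nblock
  (PySem.List.pyRange 0 (nblock + 1) 1).map (fun i => perblock * i + max 0 (min i nrem))

-- ===== PRECONDITION & SPEC =====
-- Pre_ excludes only nblock = 0, on which A raises ZeroDivisionError.
def Pre_get_block_inds (ntot : Int) (nblock : Int) : Prop := nblock ≠ 0
instance (ntot : Int) (nblock : Int) : Decidable (Pre_get_block_inds ntot nblock) := by unfold Pre_get_block_inds; infer_instance
def pvWitness_get_block_inds : Int × Int := (10, 3)

def Spec_get_block_inds (ntot : Int) (nblock : Int) (out : List Int) : Prop := out = get_block_inds_alt ntot nblock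
instance (ntot : Int) (nblock : Int) (out : List Int) : Decidable (Spec_get_block_inds ntot nblock out) := by unfold Spec_get_block_inds; infer_instance

-- ===== CLAIM (what is proved, stated in full; the proofs are below) =====
def Claim_equal_get_block_inds : Prop := ∀ (ntot : Int) (nblock : Int), Dom_get_block_inds ntot nblock → Pre_get_block_inds ntot nblock → Spec_get_block_inds ntot nblock (get_block_inds ntot nblock)

-- ===== LEMMAS AND PROOFS =====

-- closed form of each boundary
def gbi_g (perblock nrem : Int) (i : Int) : Int := perblock * i + max 0 (min i nrem)

-- the loop invariant: after k iterations the first k+1 cells carry the closed form,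
-- the rest are still the initial zeros
lemma gbi_loop (perblock nrem : Int) (n : Nat) :
    ∀ k : Nat, k ≤ n →
    ((List.range k).map (fun (j : Nat) => (j : Int))).foldl
      (fun b i =>
        PySem.List.pySetD b (i + 1) (PySem.List.pyGetD b i 0 +
          (perblock + (if i < nrem then 1 else 0)))) (List.replicate (n + 1) 0)
    = (List.range (k + 1)).map (fun (j : Nat) => gbi_g perblock nrem (j : Int))
        ++ List.replicate (n - k) 0 := by
  intro k hk
  induction k with
  | zero =>
      simp [gbi_g, List.replicate_succ]
  | succ k ih =>
      have hk' : k ≤ n := Nat.le_of_succ_le hk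
      rw [List.range_succ, List.map_append, List.foldl_append, ih hk']
      simp only [List.map_cons, List.map_nil, List.foldl_cons, List.foldl_nil]
      have hget : PySem.List.pyGetD
          ((List.range (k + 1)).map (fun (j : Nat) => gbi_g perblock nrem (j : Int))
            ++ List.replicate (n - k) 0) (k : Int) 0 = gbi_g perblock nrem (k : Int) := by
        rw [PySem.List.pyGetD_natCast]
        rw [List.getD_eq_getElem?_getD, List.getElem?_append_left (by simp)]
        simp
      rw [hget]
      have hstep : gbi_g perblock nrem (k : Int) + (perblock + (if (k : Int) < nrem then 1 else 0))
          = gbi_g perblock nrem ((k : Int) + 1) := by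
        unfold gbi_g
        have hm : max 0 (min ((k : Int) + 1) nrem)
            = max 0 (min (k : Int) nrem) + (if (k : Int) < nrem then 1 else 0) := by
          split_ifs <;> omega
        rw [hm]; ring
      rw [hstep]
      have h01 : (0 : Int) ≤ (k : Int) + 1 := by omega
      rw [PySem.List.pySetD_of_nonneg _ _ h01]
      rw [show ((k : Int) + 1).toNat = k + 1 from by omega]
      have hrep : n - k = (n - (k + 1)) + 1 := by omega
      rw [hrep, List.replicate_succ]
      rw [List.set_append_right _ _ (by simp)]
      simp [List.range_succ]

lemma gbi_nonpos (ntot nblock : Int) (h : nblock ≤ 0) :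
    get_block_inds ntot nblock = get_block_inds_alt ntot nblock := by
  unfold get_block_inds get_block_inds_alt
  rcases eq_or_lt_of_le h with rfl | h'
  · simp [PySem.List.pyRange_one]
  · have h1 : (nblock + 1).toNat = 0 := by omega
    have h2 : nblock.toNat = 0 := by omega
    simp [PySem.List.pyRange_one, h1, h2]

lemma gbi_pos (ntot nblock : Int) (h : 0 < nblock) :
    get_block_inds ntot nblock = get_block_inds_alt ntot nblock := by
  unfold get_block_inds get_block_inds_alt
  obtain ⟨n, hn⟩ : ∃ n : Nat, nblock = (n : Int) + 1 := ⟨(nblock - 1).toNat, by omega⟩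
  subst hn
  rw [PySem.List.pyRange_one, PySem.List.pyRange_one]
  have h1 : ((n : Int) + 1 - 0).toNat = n + 1 := by omega
  have h2 : ((n : Int) + 1 + 1 - 0).toNat = n + 2 := by omega
  have h3 : ((n : Int) + 1 + 1).toNat = (n + 1) + 1 := by omega
  rw [h1, h2, h3]
  simp only [zero_add]
  have := gbi_loop (Int.tdiv ntot ((n : Int) + 1))
      (ntot - Int.tdiv ntot ((n : Int) + 1) * ((n : Int) + 1)) (n + 1) (n + 1) le_rfl
  rw [this]
  simp [gbi_g]

-- ===== VERDICT (by name: the statement is the Claim_ definition above) =====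
theorem get_block_inds_spec : Claim_equal_get_block_inds := by
  intro ntot nblock _ hpre
  unfold Spec_get_block_inds
  by_cases h : nblock ≤ 0
  · exact gbi_nonpos ntot nblock h
  · exact gbi_pos ntot nblock (by omega)
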